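-- pv_equiv track=rewrite | github.com/skandavasishta/grade_management_system | functions.py | is_num_str_list
-- ===== SOURCE A (Python) =====
-- def is_num(val):
--     """this function determines if a number, inputed as a string,
--     is actually a digit or not"""
--     num_set = {'0','1','2','3','4','5','6','7','8','9','.'}
--     dec_count = 0
--     if type(val) == str:
--         for element in range(len(val)):
--             if '0' <= val[element] <= '9':
--                 continue
--             elif val[element] == '.':
--                 dec_count +=1
--                 if dec_count > 1:
--                     return False
--                 else:
--                     continue
--             else:
--                 return False
--         else:
--             return True
--     else:
--         return False
--
-- def is_num_str_list(main_list):
--     """this function determines if each element in a list is a string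
--     """
--     if len(main_list) == 0:
--         return False
--     for item in main_list:
--         if type(item) != str:
--             return False
--         if is_num(item) == False:
--             return False
--     return True
-- ===== SOURCE B (Python) =====
-- def _valid_item(item):
--     # parse the string as "<digits>[.<digits>]" by splitting on the dot:
--     # at most two fields, each empty or all digits
--     if type(item) != str:
--         return False
--     parts = item.split('.')
--     return len(parts) <= 2 and all(p == '' or p.isdigit() for p in parts)
--
-- def is_num_str_list(main_list):
--     return bool(main_list) and all(map(_valid_item, main_list))
-- ===== Notes on version B (the rewrite author's own statement) =====
-- stated objective: alternative
-- what changed: Instead of A's stateful char-by-char scan with a dot counter and early returns, B parses each string by splitting it on '.' and checks the resulting fields: at most two parts, each empty or all-digits (str.isdigit).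
import Mathlib
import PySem

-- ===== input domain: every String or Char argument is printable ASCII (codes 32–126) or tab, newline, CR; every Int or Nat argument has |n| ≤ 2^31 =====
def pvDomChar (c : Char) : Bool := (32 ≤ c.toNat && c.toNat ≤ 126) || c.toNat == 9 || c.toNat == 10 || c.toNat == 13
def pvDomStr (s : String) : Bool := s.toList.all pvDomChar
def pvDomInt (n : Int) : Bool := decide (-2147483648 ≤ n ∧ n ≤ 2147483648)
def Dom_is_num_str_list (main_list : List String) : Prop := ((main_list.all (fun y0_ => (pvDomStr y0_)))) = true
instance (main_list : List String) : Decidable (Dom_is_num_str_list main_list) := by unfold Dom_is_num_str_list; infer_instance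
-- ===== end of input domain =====

-- B parses each string by splitting on '.' (≤ 2 fields, each empty or all digits)
-- instead of A's stateful char scan with a dot counter; same cost, different decomposition.
-- ===== PORT A =====
-- is_num: char-by-char loop carrying dec_count; returns False on a bad char or a second dot
def pvIsNumLoop (cs : List Char) (dec_count : Nat) : Bool :=
  match cs with
  | [] => true
  | c :: rest =>
    if '0' ≤ c ∧ c ≤ '9' then pvIsNumLoop rest dec_count
    else if c = '.' then
      if dec_count + 1 > 1 then false else pvIsNumLoop rest (dec_count + 1)
    else false

def pvIsNum (val : String) : Bool := pvIsNumLoop val.toList 0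

-- the for-loop over items with early returns (type(item) == str is always true here)
def pvListLoop (items : List String) : Bool :=
  match items with
  | [] => true
  | item :: rest => if pvIsNum item = false then false else pvListLoop rest

def is_num_str_list (main_list : List String) : Bool :=
  if main_list.length = 0 then false else pvListLoop main_list

-- ===== PORT B =====
-- _valid_item: item.split('.') (sep ≠ '', exact via PySem.Chars.splitOn), then
-- len(parts) <= 2 and all(p == '' or p.isdigit() for p in parts)
def pvValidItem (item : String) : Bool :=
  let parts := PySem.Chars.splitOn item.toList ['.']
  decide (parts.length ≤ 2) && parts.all (fun p => p == ([] : List Char) || PySem.Chars.strIsdigit p)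

def is_num_str_list_alt (main_list : List String) : Bool :=
  !main_list.isEmpty && main_list.all pvValidItem

-- ===== PRECONDITION & SPEC =====
def Spec_is_num_str_list (main_list : List String) (out : Bool) : Prop := out = is_num_str_list_alt main_list
instance (main_list : List String) (out : Bool) : Decidable (Spec_is_num_str_list main_list out) := by unfold Spec_is_num_str_list; infer_instance

-- ===== CLAIM =====
def Claim_equal_is_num_str_list : Prop := ∀ (main_list : List String), Dom_is_num_str_list main_list → Spec_is_num_str_list main_list (is_num_str_list main_list)

-- ===== LEMMAS AND PROOFS =====
-- structural recursion equivalent of splitting a char list on '.'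
def pvSplitDot (pre : List Char) : List Char → List (List Char)
  | [] => [pre]
  | c :: rest => if c = '.' then pre :: pvSplitDot [] rest else pvSplitDot (pre ++ [c]) rest

theorem pvSplitOn_go_eq : ∀ (fuel : Nat) (l cur acc : List Char) (accs : List (List Char)),
    l.length ≤ fuel → acc = [] →
    PySem.Chars.splitOn.go ['.'] fuel l cur accs =
      accs.reverse ++ pvSplitDot cur.reverse l := by
  intro fuel
  induction fuel with
  | zero =>
    intro l cur acc accs hl _
    have : l = [] := by cases l <;> simp_all
    subst this
    simp [PySem.Chars.splitOn.go, pvSplitDot]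
  | succ n ih =>
    intro l cur acc accs hl hacc
    cases l with
    | nil => simp [PySem.Chars.splitOn.go, pvSplitDot]
    | cons c rest =>
      by_cases hc : c = '.'
      · subst hc
        have hpre : List.isPrefixOf ['.'] ('.' :: rest) = true := by
          simp [List.isPrefixOf]
        simp only [PySem.Chars.splitOn.go, hpre, if_pos]
        rw [show List.drop ['.'].length ('.' :: rest) = rest from rfl]
        rw [ih rest [] [] (cur.reverse :: accs) (by simpa using Nat.le_of_succ_le_succ hl) rfl]
        simp [pvSplitDot]
      · have hpre : List.isPrefixOf ['.'] (c :: rest) = false := by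
          simp only [List.isPrefixOf, Bool.and_true]
          exact decide_eq_false (fun h => hc h.symm)
        simp only [PySem.Chars.splitOn.go, hpre, Bool.false_eq_true, if_false]
        rw [ih rest (c :: cur) [] accs (by simpa using Nat.le_of_succ_le_succ hl) rfl]
        simp [pvSplitDot, hc]

theorem pvSplitOn_eq (cs : List Char) :
    PySem.Chars.splitOn cs ['.'] = pvSplitDot [] cs := by
  have := pvSplitOn_go_eq (cs.length + 1) cs [] [] [] (Nat.le_succ _) rfl
  simpa [PySem.Chars.splitOn] using this

theorem pvSplitDot_length (cs : List Char) : ∀ pre,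
    (pvSplitDot pre cs).length = cs.count '.' + 1 := by
  induction cs with
  | nil => intro pre; simp [pvSplitDot]
  | cons c rest ih =>
    intro pre
    by_cases hc : c = '.'
    · subst hc; simp [pvSplitDot, ih]
    · simp [pvSplitDot, hc, ih]

theorem pvPartOk_eq (p : List Char) :
    (p == ([] : List Char) || PySem.Chars.strIsdigit p) = p.all PySem.Chars.isdigit := by
  cases p <;> simp [PySem.Chars.strIsdigit]

theorem pvSplitDot_all (cs : List Char) : ∀ pre,
    (pvSplitDot pre cs).all (fun p => p.all PySem.Chars.isdigit) =
      (pre.all PySem.Chars.isdigit &&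
        cs.all (fun c => PySem.Chars.isdigit c || c == '.')) := by
  induction cs with
  | nil => intro pre; simp [pvSplitDot]
  | cons c rest ih =>
    intro pre
    by_cases hc : c = '.'
    · subst hc
      simp [pvSplitDot, ih]
    · simp [pvSplitDot, hc, ih, PySem.Chars.isdigit]
      by_cases h1 : '0' ≤ c ∧ c ≤ '9'
      · simp [h1.1, h1.2]
      · rcases not_and_or.mp h1 with h | h <;> simp [h, hc]

-- A's char loop computes: all chars allowed, and #dots + dec_count ≤ 1
theorem pvIsNumLoop_eq (cs : List Char) : ∀ d : Nat, d ≤ 1 →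
    pvIsNumLoop cs d =
      ((cs.all (fun ch => ('0' ≤ ch && ch ≤ '9') || ch == '.')) &&
        decide (cs.count '.' + d ≤ 1)) := by
  induction cs with
  | nil =>
    intro d hd
    simp [pvIsNumLoop, hd]
  | cons c rest ih =>
    intro d hd
    simp only [pvIsNumLoop]
    by_cases h1 : '0' ≤ c ∧ c ≤ '9'
    · have hne : c ≠ '.' := by rintro rfl; exact absurd h1.1 (by decide)
      rw [if_pos h1, ih d hd]
      simp [h1.1, h1.2, hne]
    · rw [if_neg h1]
      by_cases h2 : c = '.'
      · subst h2
        rw [if_pos rfl]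
        by_cases h3 : d + 1 > 1
        · rw [if_pos h3]
          have hcnt : ¬ (List.count '.' ('.' :: rest) + d ≤ 1) := by
            simp only [List.count_cons, beq_self_eq_true, if_pos]
            omega
          simp only [decide_eq_false hcnt, Bool.and_false]
        · rw [if_neg h3]
          have hd0 : d = 0 := by omega
          subst hd0
          rw [ih 1 (by omega)]
          simp only [List.all_cons, List.count_cons, beq_self_eq_true, if_pos,
            Nat.add_zero, Bool.or_true, Bool.true_and]
      · rw [if_neg h2]
        have hP : ((('0' ≤ c && c ≤ '9')) || (c == '.')) = false := by
          rcases not_and_or.mp h1 with h | h <;> simp [h, h2]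
        simp [hP]

theorem pvValidItem_eq (s : String) : pvValidItem s = pvIsNum s := by
  unfold pvValidItem pvIsNum
  rw [pvIsNumLoop_eq s.toList 0 (by omega)]
  simp only [pvSplitOn_eq]
  simp only [pvPartOk_eq]
  rw [pvSplitDot_all s.toList []]
  rw [pvSplitDot_length s.toList []]
  have h1 : decide (s.toList.count '.' + 1 ≤ 2) = decide (s.toList.count '.' + 0 ≤ 1) := by
    by_cases h : s.toList.count '.' ≤ 1 <;> simp [h]
  have h2 : (fun c => PySem.Chars.isdigit c || c == '.') =
      (fun ch => ('0' ≤ ch && ch ≤ '9') || ch == '.') := by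
    funext c; simp [PySem.Chars.isdigit]
  rw [h1, h2]
  simp [Bool.and_comm]

theorem pvListLoop_eq (items : List String) :
    pvListLoop items = items.all pvValidItem := by
  induction items with
  | nil => rfl
  | cons x rest ih =>
    rw [List.all_cons, pvValidItem_eq, ← ih]
    simp only [pvListLoop]
    by_cases h : pvIsNum x = false
    · simp [h]
    · simp only [Bool.not_eq_false] at h
      simp [h]

-- ===== VERDICT =====
theorem is_num_str_list_spec : Claim_equal_is_num_str_list := by
  intro main_list _
  unfold Spec_is_num_str_list is_num_str_list is_num_str_list_alt
  rcases main_list with _ | ⟨x, rest⟩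
  · rfl
  · simp [pvListLoop_eq]
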